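-- pv_equiv track=rewrite | github.com/froz9r-jpg/Labs | Lab2/Lab2.py | znayty_maksymalnu_kilkist
-- ===== SOURCE A (Python) =====
-- def quick_sort(khomyachky, kilkist):
--     if len(khomyachky) <= 1:
--         return khomyachky
--
--     opora = khomyachky[len(khomyachky) // 2]
--     opora_vitrata = opora[0] + opora[1] * (kilkist - 1)
--
--     menshe = []
--     rivne = []
--     bilshe = []
--
--     for h in khomyachky:
--         vitrata = h[0] + h[1] * (kilkist - 1)
--         if vitrata < opora_vitrata:
--             menshe.append(h)
--         elif vitrata == opora_vitrata:
--             rivne.append(h)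
--         else:
--             bilshe.append(h)
--
--     return quick_sort(menshe, kilkist) + rivne + quick_sort(bilshe, kilkist)
--
-- def znayty_maksymalnu_kilkist(zapas, zagalna_kilkist, khomyachky):
--     rezultat = 0
--     for kilkist in range(1, zagalna_kilkist + 1):
--         posortovani = quick_sort(khomyachky, kilkist)
--         grupa = posortovani[:kilkist]
--         zideno = 0
--         for khomyachok in grupa:
--             zideno += khomyachok[0] + khomyachok[1] * (kilkist - 1)
--         if zideno <= zapas:
--             rezultat = kilkist
--     return rezultat
-- ===== SOURCE B (Python) =====
-- def suma_naymenshykh(vartosti, k):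
--     # sum of the k smallest values (k >= len(vartosti) -> sum of all), by quickselect
--     if k <= 0:
--         return 0
--     if k >= len(vartosti):
--         return sum(vartosti)
--     opora = vartosti[len(vartosti) // 2]
--     menshi = [x for x in vartosti if x < opora]
--     rivni = [x for x in vartosti if x == opora]
--     bilshi = [x for x in vartosti if x > opora]
--     if k <= len(menshi):
--         return suma_naymenshykh(menshi, k)
--     if k <= len(menshi) + len(rivni):
--         return sum(menshi) + opora * (k - len(menshi))
--     return sum(menshi) + opora * len(rivni) + suma_naymenshykh(bilshi, k - len(menshi) - len(rivni))
--
-- def znayty_maksymalnu_kilkist(zapas, zagalna_kilkist, khomyachky):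
--     kilkist = zagalna_kilkist
--     while kilkist >= 1:
--         vartosti = [a + b * (kilkist - 1) for a, b in khomyachky]
--         if suma_naymenshykh(vartosti, kilkist) <= zapas:
--             return kilkist
--         kilkist -= 1
--     return 0
-- ===== Notes on version B (the rewrite author's own statement) =====
-- stated objective: faster
-- what changed: B never sorts: for each group size it sums the k smallest costs with a recursive 3-way quickselect (partition, recurse into one side only), and it scans the group sizes downward returning the first feasible size instead of A's full upward scan that re-sorts the whole list for every size.
import Mathlib
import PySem

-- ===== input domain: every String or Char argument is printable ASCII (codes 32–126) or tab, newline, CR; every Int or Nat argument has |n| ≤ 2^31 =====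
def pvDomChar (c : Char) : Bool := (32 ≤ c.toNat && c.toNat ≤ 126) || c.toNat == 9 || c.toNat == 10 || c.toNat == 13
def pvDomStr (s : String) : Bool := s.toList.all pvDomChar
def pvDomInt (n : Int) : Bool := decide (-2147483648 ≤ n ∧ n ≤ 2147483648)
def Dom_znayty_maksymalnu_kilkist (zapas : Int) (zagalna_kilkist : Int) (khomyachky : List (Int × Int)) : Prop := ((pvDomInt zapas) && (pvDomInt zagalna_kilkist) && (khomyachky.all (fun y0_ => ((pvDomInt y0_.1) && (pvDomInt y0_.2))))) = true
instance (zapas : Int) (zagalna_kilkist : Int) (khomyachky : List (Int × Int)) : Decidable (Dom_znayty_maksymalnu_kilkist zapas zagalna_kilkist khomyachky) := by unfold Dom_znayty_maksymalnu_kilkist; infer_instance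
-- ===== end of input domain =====

-- B never sorts: it scans the group sizes DOWNWARD and returns the first feasible one, and for each
-- size it sums the k smallest costs by a recursive 3-way quickselect instead of A's full quicksort
-- + slice (alternative algorithm; selection instead of sorting, early exit instead of a full scan).

-- ===== PORT A =====
-- helper quick_sort: Python appends into menshe/rivne/bilshe in order = List.filter.
-- khomyachky[len(khomyachky)//2] is always in range in the branch taken (length ≥ 2), so getD's default is never used.
-- The fuel argument (length of the list) only makes the same recursion structural; it is never exhausted.
def quickSortGo : Nat → List (Int × Int) → Int → List (Int × Int)
  | 0, khomyachky, _ => khomyachky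
  | Nat.succ fuel, khomyachky, kilkist =>
    if khomyachky.length ≤ 1 then khomyachky
    else
      let opora := khomyachky.getD (khomyachky.length / 2) (0, 0)
      let opora_vitrata := opora.1 + opora.2 * (kilkist - 1)
      let menshe := khomyachky.filter (fun h => decide (h.1 + h.2 * (kilkist - 1) < opora_vitrata))
      let rivne := khomyachky.filter (fun h => decide (h.1 + h.2 * (kilkist - 1) = opora_vitrata))
      let bilshe := khomyachky.filter (fun h => decide (opora_vitrata < h.1 + h.2 * (kilkist - 1)))
      quickSortGo fuel menshe kilkist ++ rivne ++ quickSortGo fuel bilshe kilkist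

def quickSortA (khomyachky : List (Int × Int)) (kilkist : Int) : List (Int × Int) :=
  quickSortGo khomyachky.length khomyachky kilkist

def znayty_maksymalnu_kilkist (zapas : Int) (zagalna_kilkist : Int) (khomyachky : List (Int × Int)) : Int :=
  (PySem.List.pyRange 1 (zagalna_kilkist + 1) 1).foldl
    (fun rezultat kilkist =>
      let posortovani := quickSortA khomyachky kilkist
      let grupa := PySem.List.slice posortovani none (some kilkist)
      let zideno := grupa.foldl (fun z kh => z + (kh.1 + kh.2 * (kilkist - 1))) 0
      if zideno ≤ zapas then kilkist else rezultat) 0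

-- ===== PORT B =====
-- helper suma_naymenshykh: sum of the k smallest values by quickselect; the fuel (length of the
-- list) only makes the same recursion structural, it is never exhausted (each recursive call's
-- list is strictly shorter).
def sumaNaymenshykh : Nat → List Int → Int → Int
  | 0, _, _ => 0
  | Nat.succ fuel, vartosti, k =>
    if k ≤ 0 then 0
    else if (vartosti.length : Int) ≤ k then vartosti.sum
    else
      let opora := vartosti.getD (vartosti.length / 2) 0
      let menshi := vartosti.filter (fun x => decide (x < opora))
      let rivni := vartosti.filter (fun x => decide (x = opora))
      let bilshi := vartosti.filter (fun x => decide (opora < x))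
      if k ≤ (menshi.length : Int) then sumaNaymenshykh fuel menshi k
      else if k ≤ (menshi.length : Int) + (rivni.length : Int) then
        menshi.sum + opora * (k - menshi.length)
      else
        menshi.sum + opora * (rivni.length : Int) + sumaNaymenshykh fuel bilshi (k - menshi.length - rivni.length)

-- the downward while-loop of B, recursion on kilkist
def pvLoopB (zapas : Int) (khomyachky : List (Int × Int)) (kilkist : Int) : Int :=
  if h : 1 ≤ kilkist then
    let vartosti := khomyachky.map (fun hh => hh.1 + hh.2 * (kilkist - 1))
    if sumaNaymenshykh vartosti.length vartosti kilkist ≤ zapas then kilkist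
    else pvLoopB zapas khomyachky (kilkist - 1)
  else 0
termination_by kilkist.toNat
decreasing_by omega

def znayty_maksymalnu_kilkist_alt (zapas : Int) (zagalna_kilkist : Int) (khomyachky : List (Int × Int)) : Int :=
  pvLoopB zapas khomyachky zagalna_kilkist

-- ===== PRECONDITION & SPEC =====
def Spec_znayty_maksymalnu_kilkist (zapas : Int) (zagalna_kilkist : Int) (khomyachky : List (Int × Int)) (out : Int) : Prop := out = znayty_maksymalnu_kilkist_alt zapas zagalna_kilkist khomyachky
instance (zapas : Int) (zagalna_kilkist : Int) (khomyachky : List (Int × Int)) (out : Int) : Decidable (Spec_znayty_maksymalnu_kilkist zapas zagalna_kilkist khomyachky out) := by unfold Spec_znayty_maksymalnu_kilkist; infer_instance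

-- ===== CLAIM (what is proved, stated in full; the proofs are below) =====
def Claim_equal_znayty_maksymalnu_kilkist : Prop := ∀ (zapas : Int) (zagalna_kilkist : Int) (khomyachky : List (Int × Int)), Dom_znayty_maksymalnu_kilkist zapas zagalna_kilkist khomyachky → Spec_znayty_maksymalnu_kilkist zapas zagalna_kilkist khomyachky (znayty_maksymalnu_kilkist zapas zagalna_kilkist khomyachky)

-- ===== LEMMAS AND PROOFS =====

-- the canonical feasibility predicate both programs compute for a given group size k:
-- "the sum of the k smallest costs a + b*(k-1) is within zapas"
def pvCost (khomyachky : List (Int × Int)) (k : Int) : List Int :=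
  khomyachky.map (fun hh => hh.1 + hh.2 * (k - 1))

def pvP (zapas : Int) (khomyachky : List (Int × Int)) (k : Int) : Bool :=
  decide (((PySem.List.sorted (pvCost khomyachky k) (fun x => x) false).take k.toNat).sum ≤ zapas)

-- three-way partition by an Int key is a permutation of the list
theorem pvPart3 {α : Type} (c : α → Int) (v : Int) (xs : List α) :
    (xs.filter (fun x => decide (c x < v)) ++
      (xs.filter (fun x => decide (c x = v)) ++ xs.filter (fun x => decide (v < c x)))).Perm xs := by
  have h2 : (xs.filter (fun x => !decide (c x < v))).filter (fun x => decide (c x = v))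
      = xs.filter (fun x => decide (c x = v)) := by
    rw [List.filter_filter]
    apply List.filter_congr
    intro x _
    by_cases h : c x = v <;> simp [h]
  have h3 : (xs.filter (fun x => !decide (c x < v))).filter (fun x => !decide (c x = v))
      = xs.filter (fun x => decide (v < c x)) := by
    rw [List.filter_filter]
    apply List.filter_congr
    intro x _
    rcases lt_trichotomy (c x) v with h | h | h <;> simp [h] <;> omega
  have h4 := List.filter_append_perm (fun x => decide (c x = v))
      (xs.filter (fun x => !decide (c x < v)))
  rw [h2, h3] at h4
  exact ((List.Perm.append_left _ h4).trans
    (List.filter_append_perm (fun x => decide (c x < v)) xs))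

-- the pivot element fails any predicate that is false on it, so each side of a partition shrinks
theorem pvFilterLt {α : Type} (xs : List α) (d : α) (p : α → Bool) (hlen : 0 < xs.length)
    (hp : p (xs.getD (xs.length / 2) d) = false) : (xs.filter p).length < xs.length := by
  refine List.length_filter_lt_length_iff_exists.2
    ⟨xs.getD (xs.length / 2) d, ?_, by simp only [hp]; simp⟩
  have hlt : xs.length / 2 < xs.length := by omega
  simp [List.getD_eq_getElem?_getD, List.getElem?_eq_getElem hlt]

-- ----- A-side: quick_sort really sorts by the cost key -----

theorem quickSortGo_perm : ∀ (fuel : Nat) (xs : List (Int × Int)) (kilkist : Int),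
    xs.length ≤ fuel → (quickSortGo fuel xs kilkist).Perm xs := by
  intro fuel
  induction fuel with
  | zero =>
    intro xs kilkist h
    exact List.Perm.refl _
  | succ n ih =>
    intro xs kilkist h
    rw [quickSortGo]
    split
    · exact List.Perm.refl _
    · rename_i hlen
      have hm := pvFilterLt xs (0, 0)
        (fun hh => decide (hh.1 + hh.2 * (kilkist - 1) < ((xs.getD (xs.length / 2) (0, 0)).1 + (xs.getD (xs.length / 2) (0, 0)).2 * (kilkist - 1)))) (by omega) (by simp)
      have hb := pvFilterLt xs (0, 0)
        (fun hh => decide (((xs.getD (xs.length / 2) (0, 0)).1 + (xs.getD (xs.length / 2) (0, 0)).2 * (kilkist - 1)) < hh.1 + hh.2 * (kilkist - 1))) (by omega) (by simp)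
      rw [List.append_assoc]
      exact ((ih _ kilkist (by omega)).append
        ((List.Perm.refl (xs.filter
            (fun hh => decide (hh.1 + hh.2 * (kilkist - 1) = ((xs.getD (xs.length / 2) (0, 0)).1 + (xs.getD (xs.length / 2) (0, 0)).2 * (kilkist - 1)))))).append
          (ih _ kilkist (by omega)))).trans
        (pvPart3 (fun hh => hh.1 + hh.2 * (kilkist - 1)) ((xs.getD (xs.length / 2) (0, 0)).1 + (xs.getD (xs.length / 2) (0, 0)).2 * (kilkist - 1)) xs)

theorem quickSortGo_pairwise : ∀ (fuel : Nat) (xs : List (Int × Int)) (kilkist : Int),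
    xs.length ≤ fuel → (quickSortGo fuel xs kilkist).Pairwise
      (fun a b => a.1 + a.2 * (kilkist - 1) ≤ b.1 + b.2 * (kilkist - 1)) := by
  intro fuel
  induction fuel with
  | zero =>
    intro xs kilkist h
    have hnil : xs = [] := List.length_eq_zero_iff.1 (by omega)
    subst hnil
    exact List.Pairwise.nil
  | succ n ih =>
    intro xs kilkist h
    rw [quickSortGo]
    split
    · rename_i hlen
      match xs, hlen with
      | [], _ => exact List.Pairwise.nil
      | [a], _ => exact List.pairwise_singleton _ _
    · rename_i hlen
      have hm := pvFilterLt xs (0, 0)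
        (fun hh => decide (hh.1 + hh.2 * (kilkist - 1) < ((xs.getD (xs.length / 2) (0, 0)).1 + (xs.getD (xs.length / 2) (0, 0)).2 * (kilkist - 1)))) (by omega) (by simp)
      have hb := pvFilterLt xs (0, 0)
        (fun hh => decide (((xs.getD (xs.length / 2) (0, 0)).1 + (xs.getD (xs.length / 2) (0, 0)).2 * (kilkist - 1)) < hh.1 + hh.2 * (kilkist - 1))) (by omega) (by simp)
      rw [List.append_assoc, List.pairwise_append]
      refine ⟨ih _ kilkist (by omega), ?_, ?_⟩
      · rw [List.pairwise_append]
        refine ⟨List.pairwise_of_forall_mem_list ?_, ih _ kilkist (by omega), ?_⟩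
        · intro a ha b hb
          simp only [List.mem_filter, decide_eq_true_eq] at ha hb
          omega
        · intro a ha b hb
          have ha' : a ∈ xs.filter (fun hh => decide (hh.1 + hh.2 * (kilkist - 1) = ((xs.getD (xs.length / 2) (0, 0)).1 + (xs.getD (xs.length / 2) (0, 0)).2 * (kilkist - 1)))) := ha
          have hb' : b ∈ xs.filter (fun hh => decide (((xs.getD (xs.length / 2) (0, 0)).1 + (xs.getD (xs.length / 2) (0, 0)).2 * (kilkist - 1)) < hh.1 + hh.2 * (kilkist - 1))) :=
            (quickSortGo_perm n _ kilkist (by omega)).mem_iff.1 hb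
          simp only [List.mem_filter, decide_eq_true_eq] at ha' hb'
          omega
      · intro a ha b hb
        have ha' : a ∈ xs.filter (fun hh => decide (hh.1 + hh.2 * (kilkist - 1) < ((xs.getD (xs.length / 2) (0, 0)).1 + (xs.getD (xs.length / 2) (0, 0)).2 * (kilkist - 1)))) :=
          (quickSortGo_perm n _ kilkist (by omega)).mem_iff.1 ha
        simp only [List.mem_filter, decide_eq_true_eq] at ha'
        rcases List.mem_append.1 hb with hb | hb
        · have hb' : b ∈ xs.filter (fun hh => decide (hh.1 + hh.2 * (kilkist - 1) = ((xs.getD (xs.length / 2) (0, 0)).1 + (xs.getD (xs.length / 2) (0, 0)).2 * (kilkist - 1)))) := hb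
          simp only [List.mem_filter, decide_eq_true_eq] at hb'
          omega
        · have hb' : b ∈ xs.filter (fun hh => decide (((xs.getD (xs.length / 2) (0, 0)).1 + (xs.getD (xs.length / 2) (0, 0)).2 * (kilkist - 1)) < hh.1 + hh.2 * (kilkist - 1))) :=
            (quickSortGo_perm n _ kilkist (by omega)).mem_iff.1 hb
          simp only [List.mem_filter, decide_eq_true_eq] at hb'
          omega

-- the mapped costs of A's quicksort output ARE sorted(costs)
theorem quickSortA_map_eq_sorted (khomyachky : List (Int × Int)) (kilkist : Int) :
    PySem.List.sorted (pvCost khomyachky kilkist) (fun x => x) false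
      = (quickSortA khomyachky kilkist).map (fun h => h.1 + h.2 * (kilkist - 1)) := by
  apply PySem.List.sorted_id_eq_of_perm_of_pairwise
  · exact ((quickSortGo_perm khomyachky.length khomyachky kilkist (by omega)).map _)
  · exact List.Pairwise.map _ (fun a b hab => hab)
      (quickSortGo_pairwise khomyachky.length khomyachky kilkist (by omega))

-- A's whole program is the "last feasible k in 1..K" fold over pvP
theorem pvA_eq (zapas zagalna_kilkist : Int) (khomyachky : List (Int × Int)) :
    znayty_maksymalnu_kilkist zapas zagalna_kilkist khomyachky
      = (PySem.List.pyRange 1 (zagalna_kilkist + 1) 1).foldl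
          (fun rezultat kilkist => if pvP zapas khomyachky kilkist then kilkist else rezultat) 0 := by
  unfold znayty_maksymalnu_kilkist
  apply PySem.List.foldl_congr_mem
  intro rezultat kilkist hk
  have hk1 : (1 : Int) ≤ kilkist := (PySem.List.mem_pyRange_one.1 hk).1
  simp only
  have hsum : ∀ (l : List (Int × Int)),
      l.foldl (fun z kh => z + (kh.1 + kh.2 * (kilkist - 1))) 0
        = (l.map (fun kh => kh.1 + kh.2 * (kilkist - 1))).sum := by
    intro l
    simpa using PySem.List.foldl_add (l := l) (g := fun kh => kh.1 + kh.2 * (kilkist - 1)) (a := 0)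
  rw [PySem.List.slice_to _ (by omega), hsum, List.map_take, ← quickSortA_map_eq_sorted]
  simp [pvP]

-- ----- B-side -----

-- every element of a constant list sums to the constant times the length
theorem pvSumConst (p : Int) : ∀ (l : List Int), (∀ x ∈ l, x = p) → l.sum = p * l.length := by
  intro l
  induction l with
  | nil => intro _; simp
  | cons a t ih =>
    intro h
    have ha := h a (by simp)
    have ht := ih (fun x hx => h x (List.mem_cons_of_mem _ hx))
    simp [ha, ht]
    ring

-- sorted(v) decomposes along a 3-way partition at any pivot value
theorem pvSortedPart (v : List Int) (p : Int) :
    PySem.List.sorted v (fun x => x) false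
      = PySem.List.sorted (v.filter (fun x => decide (x < p))) (fun x => x) false
        ++ (v.filter (fun x => decide (x = p))
        ++ PySem.List.sorted (v.filter (fun x => decide (p < x))) (fun x => x) false) := by
  apply PySem.List.sorted_id_eq_of_perm_of_pairwise
  · exact ((PySem.List.sorted_perm _ _ _).append
      ((List.Perm.refl _).append (PySem.List.sorted_perm _ _ _))).trans
      (pvPart3 (fun x => x) p v)
  · rw [List.pairwise_append]
    refine ⟨PySem.List.sorted_pairwise _ _, ?_, ?_⟩
    · rw [List.pairwise_append]
      refine ⟨List.pairwise_of_forall_mem_list ?_, PySem.List.sorted_pairwise _ _, ?_⟩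
      · intro a ha b hb
        simp only [List.mem_filter, decide_eq_true_eq] at ha hb
        omega
      · intro a ha b hb
        rw [PySem.List.mem_sorted] at hb
        simp only [List.mem_filter, decide_eq_true_eq] at ha hb
        omega
    · intro a ha b hb
      rw [PySem.List.mem_sorted] at ha
      simp only [List.mem_filter, decide_eq_true_eq] at ha
      rcases List.mem_append.1 hb with hb | hb
      · simp only [List.mem_filter, decide_eq_true_eq] at hb
        omega
      · rw [PySem.List.mem_sorted] at hb
        simp only [List.mem_filter, decide_eq_true_eq] at hb
        omega

-- quickselect computes the sum of the k smallest = sum of take k of sorted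
theorem sumaNaymenshykh_spec : ∀ (fuel : Nat) (v : List Int) (k : Int), v.length ≤ fuel →
    sumaNaymenshykh fuel v k = ((PySem.List.sorted v (fun x => x) false).take k.toNat).sum := by
  intro fuel
  induction fuel with
  | zero =>
    intro v k h
    have hnil : v = [] := List.length_eq_zero_iff.1 (by omega)
    subst hnil
    simp [sumaNaymenshykh, show PySem.List.sorted ([] : List Int) (fun x => x) false = [] from rfl]
  | succ n ih =>
    intro v k h
    rw [sumaNaymenshykh]
    split
    · rename_i hk0
      have : k.toNat = 0 := by omega
      simp [this]
    · rename_i hk0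
      split
      · rename_i hlen
        have h1 : (PySem.List.sorted v (fun x => x) false).length ≤ k.toNat := by
          rw [PySem.List.length_sorted]; omega
        rw [List.take_of_length_le h1]
        exact ((PySem.List.sorted_perm v _ _).sum_eq).symm
      · rename_i hlen
        simp only
        set p := v.getD (v.length / 2) 0 with hp
        set menshi := v.filter (fun x => decide (x < p)) with hmen
        set rivni := v.filter (fun x => decide (x = p)) with hriv
        set bilshi := v.filter (fun x => decide (p < x)) with hbil
        have hm := pvFilterLt v 0 (fun x => decide (x < p)) (by omega) (by rw [← hp]; simp)
        have hb := pvFilterLt v 0 (fun x => decide (p < x)) (by omega) (by rw [← hp]; simp)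
        rw [← hmen] at hm
        rw [← hbil] at hb
        have hdec := pvSortedPart v p
        rw [← hmen, ← hriv, ← hbil] at hdec
        have hmlen : (PySem.List.sorted menshi (fun x => x) false).length = menshi.length :=
          PySem.List.length_sorted _ _ _
        have hriv_all : ∀ x ∈ rivni, x = p := by
          intro x hx
          simp only [hriv, List.mem_filter, decide_eq_true_eq] at hx
          exact hx.2
        split
        · rename_i hkm
          rw [ih menshi k (by omega), hdec, List.take_append_of_le_length (by omega)]
        · rename_i hkm
          split
          · rename_i hkr
            have htk : (rivni.take (k.toNat - (PySem.List.sorted menshi (fun x => x) false).length)).sum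
                = p * (k - menshi.length) := by
              rw [pvSumConst p _ (fun x hx => hriv_all x (List.mem_of_mem_take hx)),
                  List.length_take]
              congr 1
              omega
            rw [hdec, List.take_append, List.take_of_length_le (by omega), List.take_append,
                show k.toNat - (PySem.List.sorted menshi (fun x => x) false).length - rivni.length = 0 from by omega,
                List.take_zero, List.sum_append, List.sum_append, List.sum_nil,
                (PySem.List.sorted_perm menshi (fun x => x) false).sum_eq, htk]
            ring
          · rename_i hkr
            rw [hdec, List.take_append, List.take_of_length_le (by omega),
                List.take_append, List.take_of_length_le (by omega),
                List.sum_append, List.sum_append,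
                (PySem.List.sorted_perm menshi (fun x => x) false).sum_eq,
                pvSumConst p rivni hriv_all,
                show k.toNat - (PySem.List.sorted menshi (fun x => x) false).length - rivni.length
                  = (k - menshi.length - rivni.length).toNat from by omega,
                ih bilshi (k - menshi.length - rivni.length) (by omega)]
            ring

-- "last k in [1..K] with P" computed upward (A's fold) = computed downward with early exit (B's loop)
theorem pvLoop_eq (zapas : Int) (khomyachky : List (Int × Int)) :
    ∀ (n : Nat) (K : Int), K.toNat = n →
      (PySem.List.pyRange 1 (K + 1) 1).foldl
          (fun rezultat kilkist => if pvP zapas khomyachky kilkist then kilkist else rezultat) 0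
        = pvLoopB zapas khomyachky K := by
  intro n
  induction n with
  | zero =>
    intro K hK
    rw [PySem.List.pyRange_one_eq_nil (by omega), pvLoopB]
    rw [dif_neg (by omega)]
    rfl
  | succ m ih =>
    intro K hK
    have hK1 : (1 : Int) ≤ K := by omega
    rw [PySem.List.pyRange_one_succ_right (by omega), List.foldl_append]
    simp only [List.foldl_cons, List.foldl_nil]
    rw [pvLoopB, dif_pos hK1]
    simp only
    have hcond : sumaNaymenshykh (khomyachky.map (fun hh => hh.1 + hh.2 * (K - 1))).length
        (khomyachky.map (fun hh => hh.1 + hh.2 * (K - 1))) K ≤ zapas ↔ pvP zapas khomyachky K = true := by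
      rw [sumaNaymenshykh_spec _ _ _ (by omega)]
      simp [pvP, pvCost]
    by_cases hP : pvP zapas khomyachky K = true
    · rw [if_pos hP, if_pos (hcond.2 hP)]
    · rw [if_neg hP, if_neg (fun hc => hP (hcond.1 hc))]
      have h2 := ih (K - 1) (by omega)
      rwa [show K - 1 + 1 = K from by ring] at h2

-- ===== VERDICT (by name: the statement is the Claim_ definition above) =====
theorem znayty_maksymalnu_kilkist_spec : Claim_equal_znayty_maksymalnu_kilkist := by
  intro zapas zagalna_kilkist khomyachky _
  unfold Spec_znayty_maksymalnu_kilkist znayty_maksymalnu_kilkist_alt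
  rw [pvA_eq, pvLoop_eq zapas khomyachky zagalna_kilkist.toNat zagalna_kilkist rfl]
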